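-- pv_equiv track=rewrite | github.com/dkfrankandersen/ITU_AdvancedAlgorithms | 5fifth/IncExcHamiltonianCycle.py | gridToGraph
-- ===== SOURCE A (Python) =====
-- def gridToGraph(n,m):
--     # Created vertice grid of n x m size
--     grid = [(i,j) for j in range(m) for i in range(n)]
--
--     # Create mapping from each grid coords to vertice id (0..n)
--     names = dict()
--     for v in range(len(grid)):
--         names[grid[v]] = v
--
--     # Vertices as id's
--     vertices = list(names.values())
--
--     # Add grid edges as an undirected graph, and replace coords with vertices id's (0..n)
--     edges = []
--     for (r,c) in grid:
--         v1 = names[(r,c)]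
--         if (r+1) < n:
--             edges.append((v1, names[(r+1,c)])) # Down
--         if (c+1) < m:
--             edges.append((v1, names[(r,c+1)])) # Right
--
--     return vertices, sorted(edges)
-- ===== SOURCE B (Python) =====
-- def gridToGraph(n, m):
--     # One flat loop over vertex ids emits the edges already in sorted order
--     # (ids increase, and the down edge (v, v+1) precedes the right edge (v, v+n)),
--     # so there is no grid list, no coords->id dict and no sort call at all.
--     V = n * m if n > 0 and m > 0 else 0
--     vertices = list(range(V))
--     edges = []
--     for v in vertices:
--         if (v + 1) % n:        # v is not at the bottom of its column: down edge
--             edges.append((v, v + 1))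
--         if v + n < V:          # v is not in the last column: right edge
--             edges.append((v, v + n))
--     return vertices, edges
-- ===== Notes on version B (the rewrite author's own statement) =====
-- stated objective: simpler
-- what changed: Instead of building a coordinate grid, a coords-to-id dict and then sorting the edge list, B runs one flat loop over vertex ids v=0..n*m-1 and emits (v,v+1)/(v,v+n) directly in the sorted order A's sorted() produces, eliminating the grid, the dict and the sort entirely.
import Mathlib
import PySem

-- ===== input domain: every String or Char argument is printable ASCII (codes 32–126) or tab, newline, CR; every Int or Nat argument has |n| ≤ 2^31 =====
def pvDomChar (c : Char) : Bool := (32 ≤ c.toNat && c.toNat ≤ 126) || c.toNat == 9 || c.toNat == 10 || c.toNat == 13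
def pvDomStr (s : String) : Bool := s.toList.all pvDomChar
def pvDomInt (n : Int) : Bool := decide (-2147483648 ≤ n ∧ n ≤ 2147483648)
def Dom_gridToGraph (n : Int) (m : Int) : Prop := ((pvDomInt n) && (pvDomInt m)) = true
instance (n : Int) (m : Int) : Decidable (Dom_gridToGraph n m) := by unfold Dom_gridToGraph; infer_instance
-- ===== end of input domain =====

-- B emits the edges in one flat loop over vertex ids, already in the order A's sort produces: no grid list, no coords->id dict, no sort call (objective: simpler).


-- ===== PORT A =====
def gridToGraph (n : Int) (m : Int) : List Int × (List (Int × Int)) :=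
  -- grid = [(i,j) for j in range(m) for i in range(n)]
  let grid : List (Int × Int) :=
    (PySem.List.pyRange 0 m 1).flatMap (fun j => (PySem.List.pyRange 0 n 1).map (fun i => (i, j)))
  -- for v in range(len(grid)): names[grid[v]] = v   (index always in range, so pyGetD's default is never used)
  let names : PySem.Dict (Int × Int) Int :=
    (PySem.List.pyRange 0 (grid.length : Int) 1).foldl
      (fun d v => d.insert (PySem.List.pyGetD grid v (0, 0)) v) PySem.Dict.empty
  -- vertices = list(names.values())
  let vertices := names.values
  -- edge loop; names[...] lookups always hit, so getD's default is never used
  let edges : List (Int × Int) := grid.foldl (fun acc rc =>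
      let v1 := names.getD rc 0
      let acc1 := if rc.1 + 1 < n then acc ++ [(v1, names.getD (rc.1 + 1, rc.2) 0)] else acc
      if rc.2 + 1 < m then acc1 ++ [(v1, names.getD (rc.1, rc.2 + 1) 0)] else acc1) []
  (vertices, PySem.List.sorted2 edges (·.1) (·.2))

-- ===== PORT B =====
def gridToGraph_alt (n : Int) (m : Int) : List Int × (List (Int × Int)) :=
  -- V = n * m if n > 0 and m > 0 else 0
  let V : Int := if 0 < n ∧ 0 < m then n * m else 0
  -- vertices = list(range(V))
  let vertices := PySem.List.pyRange 0 V 1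
  -- flat loop over vertex ids; '(v+1) % n' is truthy iff the Python-mod is nonzero
  let edges : List (Int × Int) := vertices.foldl (fun acc v =>
      let acc1 := if PySem.Int.mod (v + 1) n ≠ 0 then acc ++ [(v, v + 1)] else acc
      if v + n < V then acc1 ++ [(v, v + n)] else acc1) []
  (vertices, edges)

-- ===== PRECONDITION & SPEC =====
def Spec_gridToGraph (n : Int) (m : Int) (out : List Int × (List (Int × Int))) : Prop := out = gridToGraph_alt n m
instance (n : Int) (m : Int) (out : List Int × (List (Int × Int))) : Decidable (Spec_gridToGraph n m out) := by unfold Spec_gridToGraph; infer_instance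

-- ===== CLAIM (what is proved, stated in full; the proofs are below) =====
def Claim_equal_gridToGraph : Prop := ∀ (n : Int) (m : Int), Dom_gridToGraph n m → Spec_gridToGraph n m (gridToGraph n m)

-- ===== LEMMAS AND PROOFS =====

-- the comparator sorted2 uses on (·.1)/(·.2) keys
def pvLt (a b : Int × Int) : Bool :=
  decide (a.1 < b.1) || (!decide (b.1 < a.1) && decide (a.2 < b.2))

-- the edge block emitted for vertex id v (down edge, then right edge)
def pvBlk (n V v : Int) : List (Int × Int) :=
  (if PySem.Int.mod (v + 1) n ≠ 0 then [(v, v + 1)] else []) ++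
  (if v + n < V then [(v, v + n)] else [])

-- A's grid comprehension over Nat ranges
theorem pv_gridA_eq (n m : Int) :
    (PySem.List.pyRange 0 m 1).flatMap (fun j => (PySem.List.pyRange 0 n 1).map (fun i => (i, j)))
      = (List.range m.toNat).flatMap
          (fun J => (List.range n.toNat).map (fun I => (((I : Nat) : Int), ((J : Nat) : Int)))) := by
  simp only [PySem.List.pyRange_one, List.flatMap_map, List.map_map, sub_zero, zero_add]
  rfl

theorem pv_len_grid {α : Type} (N k : Nat) (f : Nat → Nat → α) :
    ((List.range k).flatMap (fun J => (List.range N).map (f J))).length = k * N := by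
  induction k with
  | zero => simp
  | succ k ih => simp [List.range_succ, List.flatMap_append, ih, Nat.succ_mul]

theorem pv_enum_map_range {α : Type} (f : Nat → α) (N : Nat) (s : Int) :
    PySem.List.enumerate ((List.range N).map f) s
      = (List.range N).map (fun (I : Nat) => (s + (I : Int), f I)) := by
  induction N generalizing s with
  | zero => simp [PySem.List.enumerate_nil]
  | succ k ih =>
    rw [List.range_succ, List.map_append, PySem.List.enumerate_append, ih]
    simp [PySem.List.enumerate_cons, PySem.List.enumerate_nil]

theorem pv_enum_grid (N M : Nat) :
    PySem.List.enumerate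
        ((List.range M).flatMap (fun J => (List.range N).map (fun I => (((I : Nat) : Int), ((J : Nat) : Int))))) 0
      = (List.range M).flatMap
          (fun J => (List.range N).map
            (fun I => (((J * N + I : Nat) : Int), (((I : Nat) : Int), ((J : Nat) : Int))))) := by
  induction M with
  | zero => simp [PySem.List.enumerate_nil]
  | succ k ih =>
    rw [List.range_succ, List.flatMap_append, List.flatMap_append,
        PySem.List.enumerate_append, ih, pv_len_grid]
    simp only [List.flatMap_singleton]
    rw [pv_enum_map_range]
    congr 1
    apply List.map_congr_left
    intro I _
    push_cast
    simp [add_comm]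

theorem pv_nodup_grid (N M : Nat) :
    ((List.range M).flatMap (fun J => (List.range N).map (fun I => (((I : Nat) : Int), ((J : Nat) : Int))))).Nodup := by
  have he : ((List.range M).flatMap (fun J => (List.range N).map (fun I => (((I : Nat) : Int), ((J : Nat) : Int)))))
      = ((List.range M).product (List.range N)).map (fun p => (((p.2 : Nat) : Int), ((p.1 : Nat) : Int))) := by
    simp only [List.product, List.map_flatMap, List.map_map]
    rfl
  rw [he]
  refine List.Nodup.map ?_ ((List.nodup_range).product (List.nodup_range))
  intro ⟨a, b⟩ ⟨c, d⟩ h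
  simp only [Prod.mk.injEq, Nat.cast_inj] at h
  simp [h.1, h.2]

theorem pv_range_mul_flat (M N : Nat) :
    (List.range M).flatMap (fun J => (List.range N).map (fun I => J * N + I)) = List.range (M * N) := by
  induction M with
  | zero => simp
  | succ k ih =>
    rw [List.range_succ, List.flatMap_append, ih, Nat.succ_mul, List.range_add]
    simp

-- Python '%' by a positive divisor is Lean's emod
theorem pv_mod_pos (a b : Int) (h : 0 < b) : PySem.Int.mod a b = a % b := by
  simp [PySem.Int.mod, Int.fmod_eq_emod]; omega

-- the down-edge condition in id form
theorem pv_down_iff (n : Int) (J I : Int) (h0 : 0 < n) (hI : 0 ≤ I) (hIN : I < n) :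
    (PySem.Int.mod (J * n + I + 1) n ≠ 0) ↔ I + 1 < n := by
  rw [pv_mod_pos _ _ h0]
  have he : (J * n + I + 1) % n = (I + 1) % n := by
    have : J * n + I + 1 = (I + 1) + n * J := by ring
    rw [this, Int.add_mul_emod_self_left]
  rw [he]
  by_cases hc : I + 1 < n
  · rw [Int.emod_eq_of_lt (by omega) hc]; omega
  · have : I + 1 = n := by omega
    simp [this]

-- the right-edge condition in id form
theorem pv_right_iff (n m : Int) (J I : Int) (h0 : 0 < n) (hI : 0 ≤ I) (hIN : I < n)
    (hJ : 0 ≤ J) (hJM : J < m) :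
    (J * n + I + n < n * m) ↔ J + 1 < m := by
  constructor
  · intro h
    by_contra hc
    have : J = m - 1 := by omega
    subst this
    nlinarith
  · intro h
    nlinarith

-- fold with conditional appends = flatMap of blocks
theorem pv_fold_blk (n V : Int) (l : List Int) (acc : List (Int × Int)) :
    l.foldl (fun acc v =>
        let acc1 := if PySem.Int.mod (v + 1) n ≠ 0 then acc ++ [(v, v + 1)] else acc
        if v + n < V then acc1 ++ [(v, v + n)] else acc1) acc
      = acc ++ l.flatMap (pvBlk n V) := by
  have hb : ∀ (acc : List (Int × Int)) (v : Int),
      (let acc1 := if PySem.Int.mod (v + 1) n ≠ 0 then acc ++ [(v, v + 1)] else acc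
       if v + n < V then acc1 ++ [(v, v + n)] else acc1) = acc ++ pvBlk n V v := by
    intro acc v
    simp only [pvBlk]
    split_ifs <;> simp
  calc l.foldl (fun acc v =>
        let acc1 := if PySem.Int.mod (v + 1) n ≠ 0 then acc ++ [(v, v + 1)] else acc
        if v + n < V then acc1 ++ [(v, v + n)] else acc1) acc
      = l.foldl (fun acc v => acc ++ pvBlk n V v) acc := by
        apply PySem.List.foldl_congr_mem; intro acc v _; exact hb acc v
    _ = acc ++ l.flatMap (pvBlk n V) := PySem.List.foldl_append_eq_flatMap _ _ _

-- insertion of a maximal element goes to the end, so an already-ordered list folds to itself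
theorem pv_foldl_insertBy {α : Type} (bf : α → α → Bool) (E : List α) (acc : List α)
    (hacc : ∀ x ∈ E, ∀ y ∈ acc, bf x y = false)
    (hE : E.Pairwise (fun a b => bf b a = false)) :
    E.foldl (fun acc x => PySem.List.insertBy bf x acc) acc = acc ++ E := by
  induction E generalizing acc with
  | nil => simp
  | cons x xs ih =>
    rw [List.foldl_cons,
        PySem.List.insertBy_of_forall_not_before bf x acc (hacc x (by simp))]
    rw [List.pairwise_cons] at hE
    rw [ih (acc ++ [x]) ?_ hE.2]
    · simp
    · intro z hz y hy
      rcases List.mem_append.mp hy with hy | hy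
      · exact hacc z (by simp [hz]) y hy
      · rw [List.mem_singleton.mp hy]
        exact hE.1 z hz

theorem pv_sorted2_eq_self (E : List (Int × Int))
    (h : E.Pairwise (fun a b => pvLt b a = false)) :
    PySem.List.sorted2 E (·.1) (·.2) = E := by
  show E.foldl (fun acc x => PySem.List.insertBy _ x acc) [] = E
  have := pv_foldl_insertBy (fun a b => pvLt a b) E [] (by simp) h
  simpa [pvLt] using this

-- elements of a block share the block's first component
theorem pv_blk_fst (n V v : Int) : ∀ x ∈ pvBlk n V v, x.1 = v := by
  intro x hx
  simp only [pvBlk, List.mem_append] at hx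
  rcases hx with hx | hx <;> split_ifs at hx <;> simp_all

theorem pv_lt_false_of_fst_lt (a b : Int × Int) (h : a.1 < b.1) : pvLt b a = false := by
  simp [pvLt]; omega

-- ===== VERDICT (by name: the statement is the Claim_ definition above) =====
theorem gridToGraph_spec : Claim_equal_gridToGraph := by
  intro n m _
  unfold Spec_gridToGraph
  by_cases h : n ≤ 0 ∨ m ≤ 0
  · -- degenerate: both sides ([], [])
    have hgrid : (PySem.List.pyRange 0 m 1).flatMap (fun j => (PySem.List.pyRange 0 n 1).map (fun i => (i, j))) = [] := by
      rcases h with h | h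
      · simp [PySem.List.pyRange_one_eq_nil h]
      · simp [PySem.List.pyRange_one_eq_nil h]
    have hV : (if 0 < n ∧ 0 < m then n * m else 0) = (0 : Int) := by
      rw [if_neg]; omega
    simp [gridToGraph, gridToGraph_alt, hgrid, hV, PySem.List.pyRange_one_eq_nil (le_refl (0:Int)),
      PySem.List.sorted2, PySem.Dict.values, PySem.Dict.empty]
  · have hn : 0 < n := by omega
    have hm : 0 < m := by omega
    set N := n.toNat with hN
    set M := m.toNat with hM
    have hnN : (N : Int) = n := Int.toNat_of_nonneg (le_of_lt hn)
    have hmM : (M : Int) = m := Int.toNat_of_nonneg (le_of_lt hm)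
    -- the grid
    set grid : List (Int × Int) :=
      (List.range M).flatMap (fun J => (List.range N).map (fun I => (((I : Nat) : Int), ((J : Nat) : Int)))) with hgrid
    have hA : (PySem.List.pyRange 0 m 1).flatMap (fun j => (PySem.List.pyRange 0 n 1).map (fun i => (i, j))) = grid :=
      pv_gridA_eq n m
    -- the dict
    set names : PySem.Dict (Int × Int) Int :=
      (PySem.List.pyRange 0 (grid.length : Int) 1).foldl
        (fun d v => d.insert (PySem.List.pyGetD grid v (0, 0)) v) PySem.Dict.empty with hnames
    have hfold : names = (PySem.List.enumerate grid 0).foldl (fun d p => d.insert p.2 p.1) PySem.Dict.empty := by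
      rw [PySem.List.enumerate_eq_map_pyRange grid (0, 0), List.foldl_map]
      simp [hnames]
    have hsnd : ((PySem.List.enumerate grid 0).map (fun p => p.2)).Nodup := by
      rw [PySem.List.map_snd_enumerate]
      exact pv_nodup_grid N M
    have hitems : names.items = (List.range M).flatMap
        (fun J => (List.range N).map
          (fun I => ((((I : Nat) : Int), ((J : Nat) : Int)), ((J * N + I : Nat) : Int)))) := by
      rw [hfold, PySem.Dict.items_foldl_insert_fresh (PySem.List.enumerate grid 0)
            (fun p => p.2) (fun p => p.1) PySem.Dict.empty (by simp [PySem.Dict.contains_empty]) hsnd]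
      rw [pv_enum_grid]
      simp only [List.map_flatMap, List.map_map, PySem.Dict.empty]
      rfl
    have hkeys : names.keys.Nodup := by
      rw [hfold]
      exact PySem.Dict.nodup_keys_foldl_insert_key _ _ _ _ (by simp [PySem.Dict.empty, PySem.Dict.keys])
    have hget : ∀ r c : Int, 0 ≤ r → r < n → 0 ≤ c → c < m → names.getD (r, c) 0 = c * n + r := by
      intro r c h1 h2 h3 h4
      have hmem : ((r, c), c * n + r) ∈ names.items := by
        rw [hitems]
        refine List.mem_flatMap.mpr ⟨c.toNat, by simp [List.mem_range]; omega, ?_⟩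
        refine List.mem_map.mpr ⟨r.toNat, by simp [List.mem_range]; omega, ?_⟩
        have h5 : (r.toNat : Int) = r := Int.toNat_of_nonneg h1
        have h6 : (c.toNat : Int) = c := Int.toNat_of_nonneg h3
        simp only [Prod.mk.injEq]
        refine ⟨⟨h5, h6⟩, ?_⟩
        push_cast
        rw [h5, h6, hnN]
      exact PySem.Dict.getD_of_mem_items names hmem hkeys 0
    -- vertices
    have hvert : names.values = PySem.List.pyRange 0 (n * m) 1 := by
      simp only [PySem.Dict.values, hitems, List.map_flatMap, List.map_map]
      calc (List.range M).flatMap (fun J => (List.range N).map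
              ((fun x => x.2) ∘ (fun I => ((((I : Nat) : Int), ((J : Nat) : Int)), ((J * N + I : Nat) : Int)))))
          = ((List.range M).flatMap (fun J => (List.range N).map (fun I => J * N + I))).map (fun k => ((k : Nat) : Int)) := by
            simp [List.map_flatMap, List.map_map]; rfl
        _ = (List.range (M * N)).map (fun k => ((k : Nat) : Int)) := by rw [pv_range_mul_flat]
        _ = PySem.List.pyRange 0 (n * m) 1 := by
            rw [PySem.List.pyRange_one]
            have : ((n * m - 0).toNat) = M * N := by
              have h7 : n * m = ((M * N : Nat) : Int) := by rw [← hnN, ← hmM]; push_cast; ring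
              rw [h7, sub_zero, Int.toNat_natCast]
            rw [this]
            simp
    -- the flat-id edge list
    set EB : List (Int × Int) :=
      (List.range M).flatMap (fun J => (List.range N).flatMap
        (fun I => pvBlk n (n * m) ((J * N + I : Nat) : Int))) with hEB
    -- A's edge fold equals EB
    have hedgesA :
        grid.foldl (fun acc rc =>
            let v1 := names.getD rc 0
            let acc1 := if rc.1 + 1 < n then acc ++ [(v1, names.getD (rc.1 + 1, rc.2) 0)] else acc
            if rc.2 + 1 < m then acc1 ++ [(v1, names.getD (rc.1, rc.2 + 1) 0)] else acc1) []
          = EB := by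
      rw [hgrid]
      rw [List.foldl_flatMap]
      -- outer fold over J
      have houter : ∀ (acc : List (Int × Int)) (J : Nat), J ∈ List.range M →
          ((List.range N).map (fun I => (((I : Nat) : Int), ((J : Nat) : Int)))).foldl
            (fun acc rc =>
              let v1 := names.getD rc 0
              let acc1 := if rc.1 + 1 < n then acc ++ [(v1, names.getD (rc.1 + 1, rc.2) 0)] else acc
              if rc.2 + 1 < m then acc1 ++ [(v1, names.getD (rc.1, rc.2 + 1) 0)] else acc1) acc
          = acc ++ (List.range N).flatMap (fun I => pvBlk n (n * m) ((J * N + I : Nat) : Int)) := by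
        intro acc J hJ
        rw [List.foldl_map]
        rw [List.mem_range] at hJ
        have hJb : (0 : Int) ≤ (J : Int) := by positivity
        have hJm : (J : Int) < m := by rw [← hmM]; exact_mod_cast hJ
        calc (List.range N).foldl (fun acc I =>
                let rc : Int × Int := (((I : Nat) : Int), ((J : Nat) : Int))
                let v1 := names.getD rc 0
                let acc1 := if rc.1 + 1 < n then acc ++ [(v1, names.getD (rc.1 + 1, rc.2) 0)] else acc
                if rc.2 + 1 < m then acc1 ++ [(v1, names.getD (rc.1, rc.2 + 1) 0)] else acc1) acc
            = (List.range N).foldl (fun acc I => acc ++ pvBlk n (n * m) ((J * N + I : Nat) : Int)) acc := by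
              apply PySem.List.foldl_congr_mem
              intro acc I hI
              rw [List.mem_range] at hI
              have hIb : (0 : Int) ≤ (I : Int) := by positivity
              have hIn : (I : Int) < n := by rw [← hnN]; exact_mod_cast hI
              have hv : ((J * N + I : Nat) : Int) = (J : Int) * n + (I : Int) := by
                push_cast; rw [hnN]
              have hd : (PySem.Int.mod (((J * N + I : Nat) : Int) + 1) n ≠ 0) ↔ ((I : Int) + 1 < n) := by
                rw [hv]; exact pv_down_iff n J I hn hIb hIn
              have hr : (((J * N + I : Nat) : Int) + n < n * m) ↔ ((J : Int) + 1 < m) := by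
                rw [hv]; exact pv_right_iff n m J I hn hIb hIn hJb hJm
              simp only [pvBlk]
              rw [hget I J hIb hIn hJb hJm]
              by_cases h1 : (I : Int) + 1 < n <;> by_cases h2 : (J : Int) + 1 < m
              · rw [if_pos h1, if_pos h2, if_pos (hd.mpr h1), if_pos (hr.mpr h2),
                    hget (I + 1) J (by omega) h1 hJb hJm, hget I (J + 1) hIb hIn (by omega) h2, hv]
                simp; constructor <;> ring
              · rw [if_pos h1, if_neg h2, if_pos (hd.mpr h1),
                    if_neg (by rw [hr]; exact h2),
                    hget (I + 1) J (by omega) h1 hJb hJm, hv]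
                simp; ring
              · rw [if_neg h1, if_pos h2, if_neg (by rw [hd]; exact h1), if_pos (hr.mpr h2),
                    hget I (J + 1) hIb hIn (by omega) h2, hv]
                simp; ring
              · rw [if_neg h1, if_neg h2, if_neg (by rw [hd]; exact h1),
                    if_neg (by rw [hr]; exact h2)]
                simp
          _ = acc ++ (List.range N).flatMap (fun I => pvBlk n (n * m) ((J * N + I : Nat) : Int)) :=
              PySem.List.foldl_append_eq_flatMap _ _ _
      calc (List.range M).foldl (fun acc J =>
              ((List.range N).map (fun I => (((I : Nat) : Int), ((J : Nat) : Int)))).foldl _ acc) []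
          = (List.range M).foldl (fun acc J =>
              acc ++ (List.range N).flatMap (fun I => pvBlk n (n * m) ((J * N + I : Nat) : Int))) [] := by
            apply PySem.List.foldl_congr_mem
            intro acc J hJ
            exact houter acc J hJ
        _ = EB := by rw [PySem.List.foldl_append_eq_flatMap]; simp [hEB]
    -- B's edge fold equals EB
    have hedgesB :
        (PySem.List.pyRange 0 (n * m) 1).foldl (fun acc v =>
            let acc1 := if PySem.Int.mod (v + 1) n ≠ 0 then acc ++ [(v, v + 1)] else acc
            if v + n < n * m then acc1 ++ [(v, v + n)] else acc1) []
          = EB := by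
      rw [pv_fold_blk, List.nil_append]
      have hr : PySem.List.pyRange 0 (n * m) 1 = (List.range (M * N)).map (fun k => ((k : Nat) : Int)) := by
        rw [PySem.List.pyRange_one]
        have : ((n * m - 0).toNat) = M * N := by
          have h7 : n * m = ((M * N : Nat) : Int) := by rw [← hnN, ← hmM]; push_cast; ring
          rw [h7, sub_zero, Int.toNat_natCast]
        rw [this]; simp
      rw [hr, List.flatMap_map, ← pv_range_mul_flat M N, List.flatMap_assoc]
      simp only [List.flatMap_map, hEB]
    -- EB is already in sorted order (strictly increasing first keys; within one id, down before right)
    have hpair : EB.Pairwise (fun a b => pvLt b a = false) := by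
      rw [hEB]
      rw [List.pairwise_flatMap]
      constructor
      · intro J hJ
        rw [List.pairwise_flatMap]
        constructor
        · intro I hI
          simp only [pvBlk]
          split_ifs <;> simp [pvLt] <;> omega
        · rw [List.pairwise_iff_getElem]
          intro i j hi hj hij x hx y hy
          apply pv_lt_false_of_fst_lt
          rw [pv_blk_fst _ _ _ x hx, pv_blk_fst _ _ _ y hy]
          have : (List.range N)[i] = i := List.getElem_range _
          have : (List.range N)[j] = j := List.getElem_range _
          simp only [List.getElem_range]
          have : J * N + i < J * N + j := by
            simp only [List.length_range] at hi hj
            omega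
          exact_mod_cast this
      · rw [List.pairwise_iff_getElem]
        intro i j hi hj hij x hx y hy
        simp only [List.length_range] at hi hj
        simp only [List.getElem_range] at hx hy
        rw [List.mem_flatMap] at hx hy
        obtain ⟨I1, hI1, hx⟩ := hx
        obtain ⟨I2, hI2, hy⟩ := hy
        rw [List.mem_range] at hI1 hI2
        apply pv_lt_false_of_fst_lt
        rw [pv_blk_fst _ _ _ x hx, pv_blk_fst _ _ _ y hy]
        have h1 : i * N + I1 < (i + 1) * N := by
          rw [Nat.succ_mul]
          exact Nat.add_lt_add_left hI1 _
        have h2 : (i + 1) * N ≤ j * N := Nat.mul_le_mul_right N (by omega)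
        have : i * N + I1 < j * N + I2 :=
          lt_of_lt_of_le h1 (le_trans h2 (Nat.le_add_right _ _))
        exact_mod_cast this
    -- assemble
    show gridToGraph n m = gridToGraph_alt n m
    rw [gridToGraph, gridToGraph_alt]
    have hV : (if 0 < n ∧ 0 < m then n * m else 0) = n * m := if_pos ⟨hn, hm⟩
    simp only [hA, ← hnames, hvert, hV, hedgesA, hedgesB]
    rw [pv_sorted2_eq_self EB hpair]
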